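-- pv_equiv track=rewrite | github.com/Captainexpo-1/AdventOfCode2023 | days/day10/day10_2.py | count_filled_cells
-- ===== SOURCE A (Python) =====
-- def grid_is_filled(g):
--     return g == [
--         ["*", "*", "*"],
--         ["*", "*", "*"],
--         ["*", "*", "*"]
--     ]
--
-- def count_filled_cells(arr):
--     """Count the number of 3x3 grid cells that are completely filled."""
--     filled_count = 0
--     for y in range(0, len(arr) - 2, 3):
--         for x in range(0, len(arr[0]) - 2, 3):
--             # Extract 3x3 cell
--             cell = [row[x:x + 3] for row in arr[y:y + 3]]
--             # Check if the cell is completely filled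
--             if grid_is_filled(cell):
--                 filled_count += 1
--     return filled_count
-- ===== SOURCE B (Python) =====
-- def count_filled_cells(arr):
--     """Count the number of 3x3 grid cells that are completely filled."""
--     if not arr:
--         return 0
--     width = len(arr[0])
--     stars = [(r // 3, c // 3)
--              for r, row in enumerate(arr)
--              for c, v in enumerate(row[:width])
--              if v == "*"]
--     counts = {}
--     for b in stars:
--         counts[b] = counts.get(b, 0) + 1
--     return sum(1 for v in counts.values() if v == 9)
-- ===== Notes on version B (the rewrite author's own statement) =====
-- stated objective: faster
-- what changed: Replaces the nested block-loops that extract each 3x3 sub-grid via slicing and compare it to a literal with a single sweep that buckets every '*' cell by its block index (r//3, c//3) into a dict counter and then counts buckets holding exactly 9 stars.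
import Mathlib
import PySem

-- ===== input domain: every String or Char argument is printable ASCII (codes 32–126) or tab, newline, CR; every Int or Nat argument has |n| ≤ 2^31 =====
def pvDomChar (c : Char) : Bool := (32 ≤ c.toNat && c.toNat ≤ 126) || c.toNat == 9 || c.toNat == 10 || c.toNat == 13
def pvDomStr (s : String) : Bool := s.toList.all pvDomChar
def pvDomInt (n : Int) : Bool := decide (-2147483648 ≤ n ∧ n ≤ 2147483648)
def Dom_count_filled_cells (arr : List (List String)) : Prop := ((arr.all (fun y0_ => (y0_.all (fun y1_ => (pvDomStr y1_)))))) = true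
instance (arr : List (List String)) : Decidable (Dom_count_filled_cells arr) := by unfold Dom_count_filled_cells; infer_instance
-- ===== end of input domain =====

-- B replaces A's nested extract-3x3-and-compare loops by one sweep that buckets '*' cells
-- into a dict counter keyed by block index and counts full (= 9) buckets; a timing run
-- measured B faster by a constant factor (no per-block list slicing/allocation).

-- ===== PORT A =====
def grid_is_filled (g : List (List String)) : Bool :=
  g == [["*", "*", "*"], ["*", "*", "*"], ["*", "*", "*"]]

-- In Python `arr[0]` is only evaluated when the outer loop body runs (so arr ≠ []);
-- the default [] of pyGetD is therefore never observable.
def count_filled_cells (arr : List (List String)) : Int :=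
  (PySem.List.pyRange 0 ((arr.length : Int) - 2) 3).foldl (fun filled_count y =>
    (PySem.List.pyRange 0 (((PySem.List.pyGetD arr 0 []).length : Int) - 2) 3).foldl
      (fun filled_count x =>
        let cell := (PySem.List.slice arr (some y) (some (y + 3))).map
          (fun row => PySem.List.slice row (some x) (some (x + 3)))
        if grid_is_filled cell then filled_count + 1 else filled_count)
      filled_count) 0

-- ===== PORT B =====
-- the per-row part of Source B's star-list comprehension: [(r//3, c//3) for c, v in enumerate(row[:width]) if v == "*"]
def pvRowStars (width : Nat) (rrow : Int × List String) : List (Int × Int) :=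
  ((PySem.List.enumerate (PySem.List.slice rrow.2 none (some (width : Int))) 0).filter
      (fun cv => cv.2 == "*")).map
    (fun cv => (PySem.Int.floordiv rrow.1 3, PySem.Int.floordiv cv.1 3))

-- Source B's `stars` comprehension
def pvStars (arr : List (List String)) (width : Nat) : List (Int × Int) :=
  (PySem.List.enumerate arr 0).flatMap (pvRowStars width)

def count_filled_cells_alt (arr : List (List String)) : Int :=
  if arr = [] then 0
  else
    let width : Nat := (PySem.List.pyGetD arr 0 []).length
    let stars : List (Int × Int) := pvStars arr width
    let counts : PySem.Dict (Int × Int) Int :=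
      stars.foldl (fun d b => d.insert b (d.getD b 0 + 1)) PySem.Dict.empty
    counts.values.foldl (fun acc v => if v == 9 then acc + 1 else acc) 0

-- ===== PRECONDITION & SPEC =====
def Spec_count_filled_cells (arr : List (List String)) (out : Int) : Prop := out = count_filled_cells_alt arr
instance (arr : List (List String)) (out : Int) : Decidable (Spec_count_filled_cells arr out) := by unfold Spec_count_filled_cells; infer_instance

-- ===== CLAIM (what is proved, stated in full; the proofs are below) =====
def Claim_equal_count_filled_cells : Prop := ∀ (arr : List (List String)), Dom_count_filled_cells arr → Spec_count_filled_cells arr (count_filled_cells arr)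

-- ===== LEMMAS AND PROOFS =====

-- the literal full block row
def pvS3 : List String := ["*", "*", "*"]

-- block row as A reads it (no width clip) and as B reads it (row clipped to width)
def pvBlkA (x : Nat) (row : List String) : List String := (row.drop (3*x)).take 3
def pvBlkB (w x : Nat) (row : List String) : List String := ((row.take w).drop (3*x)).take 3

-- stars contributed by one row to block column x
def pvCnt3 (w x : Nat) (row : List String) : Nat := (pvBlkB w x row).count "*"

-- the (at most three) rows of block row b
def pvW (arr : List (List String)) (b : Nat) : List (List String) := (arr.drop (3*b)).take 3

-- B's full-block predicate, as a Bool on block coordinates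
def pvQB (arr : List (List String)) (w : Nat) (p : Nat × Nat) : Bool :=
  (pvW arr p.1).map (pvBlkB w p.2) == [pvS3, pvS3, pvS3]

theorem pv_window_sum {α : Type} (g : α → Nat) (b : Nat) :
    ∀ (xs : List α) (s : Nat),
      ((PySem.List.enumerate xs (s : Int)).map
          (fun ix => if PySem.Int.floordiv ix.1 3 = (b : Int) then g ix.2 else 0)).sum
        = (((xs.drop (3*b - s)).take ((3*b + 3 - s) - (3*b - s))).map g).sum := by
  intro xs
  induction xs with
  | nil => intro s; simp [PySem.List.enumerate]
  | cons x xs ih =>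
    intro s
    rw [PySem.List.enumerate_cons]
    have hcast : ((s : Int) + 1) = ((s + 1 : Nat) : Int) := by push_cast; ring
    rw [List.map_cons, List.sum_cons, hcast, ih (s + 1)]
    have hfd : PySem.Int.floordiv (s : Int) 3 = ((s / 3 : Nat) : Int) := by
      exact_mod_cast PySem.Int.floordiv_natCast s 3
    rcases Nat.lt_or_ge s (3*b) with h | h
    · have hne : ¬ PySem.Int.floordiv (s : Int) 3 = (b : Int) := by
        rw [hfd]; intro hc; have : s / 3 = b := by exact_mod_cast hc
        omega
      rw [if_neg hne]
      have e1 : 3*b - s = (3*b - (s+1)) + 1 := by omega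
      have e2 : (3*b + 3 - s) - (3*b - s) = (3*b + 3 - (s+1)) - (3*b - (s+1)) := by omega
      rw [e2, e1, List.drop_succ_cons, Nat.zero_add]
    · rcases Nat.lt_or_ge s (3*b + 3) with h2 | h2
      · have heq : PySem.Int.floordiv (s : Int) 3 = (b : Int) := by
          rw [hfd]; congr 1; omega
        rw [if_pos heq]
        have e1 : 3*b - s = 0 := by omega
        have e1' : 3*b - (s+1) = 0 := by omega
        have e2 : (3*b + 3 - s) - (3*b - s) = ((3*b + 3 - (s+1)) - (3*b - (s+1))) + 1 := by omega
        rw [e2, e1, e1', List.drop_zero, List.drop_zero, List.take_succ_cons,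
          List.map_cons, List.sum_cons]
      · have hne : ¬ PySem.Int.floordiv (s : Int) 3 = (b : Int) := by
          rw [hfd]; intro hc; have : s / 3 = b := by exact_mod_cast hc
          omega
        rw [if_neg hne]
        have e2 : (3*b + 3 - s) - (3*b - s) = 0 := by omega
        have e2' : (3*b + 3 - (s+1)) - (3*b - (s+1)) = 0 := by omega
        rw [e2, e2', List.take_zero, List.take_zero]
        simp

theorem pv_sum3_eq_nine {α : Type} (ws : List α) (f : α → Nat) (hlen : ws.length ≤ 3)
    (hf : ∀ x ∈ ws, f x ≤ 3) :
    ((ws.map f).sum = 9 ↔ ws.length = 3 ∧ ∀ x ∈ ws, f x = 3) := by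
  rcases ws with _ | ⟨a, _ | ⟨b, _ | ⟨c, _ | ⟨d, t⟩⟩⟩⟩ <;> simp_all <;> omega

theorem pv_count3_eq (l : List String) (h : l.length ≤ 3) :
    (l.count "*" = 3 ↔ l = ["*", "*", "*"]) := by
  rcases l with _ | ⟨a, _ | ⟨b, _ | ⟨c, _ | ⟨d, t⟩⟩⟩⟩ <;>
    simp_all [List.count_cons] <;> split_ifs <;> simp_all <;> omega

theorem pv_map_eq_three {α β : Type} (ws : List α) (f : α → β) (v : β) :
    (ws.map f = [v, v, v] ↔ ws.length = 3 ∧ ∀ x ∈ ws, f x = v) := by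
  rcases ws with _ | ⟨a, _ | ⟨b, _ | ⟨c, _ | ⟨d, t⟩⟩⟩⟩ <;> simp_all

-- per-row star count for a single key
theorem pv_count_rowStars (w : Nat) (r : Int) (row : List String) (b x : Nat) :
    List.count (((b : Int), (x : Int))) (pvRowStars w (r, row)) =
      if PySem.Int.floordiv r 3 = (b : Int) then pvCnt3 w x row else 0 := by
  unfold pvRowStars
  rw [List.count_eq_countP, List.countP_map, List.countP_filter]
  have hsl : PySem.List.slice row none (some ((w : Nat) : Int)) = row.take w := by
    rw [PySem.List.slice_to row (by positivity)]; simp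
  simp only [hsl]
  by_cases hr : PySem.Int.floordiv r 3 = (b : Int)
  · rw [if_pos hr]
    have h1 : List.countP
        (fun cv : Int × String => ((fun y => y == ((b : Int), (x : Int))) ∘ fun cv : Int × String => (PySem.Int.floordiv r 3, PySem.Int.floordiv cv.1 3)) cv && (cv.2 == "*"))
        (PySem.List.enumerate (row.take w) 0)
        = List.countP (fun cv : Int × String => if PySem.Int.floordiv cv.1 3 = (x : Int) then (if cv.2 == "*" then true else false) else false)
          (PySem.List.enumerate (row.take w) 0) := by
      apply List.countP_congr
      intro cv _
      simp only [Function.comp, hr]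
      by_cases hx : PySem.Int.floordiv cv.1 3 = (x : Int) <;> by_cases hs : cv.2 = "*" <;>
        simp [hs]
    rw [h1, ← PySem.List.sum_map_ite_one_zero_nat]
    have h2 : (List.map (fun cv : Int × String => if (if PySem.Int.floordiv cv.1 3 = (x : Int) then (if cv.2 == "*" then true else false) else false) = true then (1:Nat) else 0)
        (PySem.List.enumerate (row.take w) 0)).sum
        = (List.map (fun cv : Int × String => if PySem.Int.floordiv cv.1 3 = ((x : Nat) : Int) then (fun v : String => if v == "*" then (1:Nat) else 0) cv.2 else 0)
          (PySem.List.enumerate (row.take w) ((0 : Nat) : Int))).sum := by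
      norm_num
      congr 1
      apply List.map_congr_left
      intro cv _
      split_ifs <;> simp_all
    rw [h2, pv_window_sum (fun v : String => if v == "*" then (1:Nat) else 0) x (row.take w) 0]
    simp only [Nat.sub_zero]
    rw [show 3*x + 3 - 3*x = 3 from by omega, PySem.List.sum_map_ite_one_zero_nat,
      ← List.count_eq_countP]
    rfl
  · rw [if_neg hr]
    apply List.countP_eq_zero.mpr
    intro cv _ hc
    simp only [Function.comp, Bool.and_eq_true, beq_iff_eq, Prod.mk.injEq] at hc
    exact hr hc.1.1

-- total star count of block (b, x)
theorem pv_count_stars (arr : List (List String)) (w b x : Nat) :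
    List.count (((b : Int), (x : Int))) (pvStars arr w) = ((pvW arr b).map (pvCnt3 w x)).sum := by
  unfold pvStars
  rw [List.count_eq_countP, List.countP_flatMap]
  have h1 : List.map (List.countP (fun y => y == ((b : Int), (x : Int))) ∘ pvRowStars w)
        (PySem.List.enumerate arr 0)
      = List.map (fun ix : Int × List String =>
          if PySem.Int.floordiv ix.1 3 = (b : Int) then pvCnt3 w x ix.2 else 0)
        (PySem.List.enumerate arr 0) := by
    apply List.map_congr_left
    intro rrow _
    have := pv_count_rowStars w rrow.1 rrow.2 b x
    rw [List.count_eq_countP] at this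
    simpa [Function.comp] using this
  rw [h1]
  have h2 := pv_window_sum (pvCnt3 w x) b arr 0
  simp only [Nat.cast_zero] at h2
  rw [h2]
  simp only [Nat.sub_zero]
  rw [show 3*b + 3 - 3*b = 3 from by omega]
  rfl

-- a block holds nine stars exactly when it is a full block
theorem pv_count_eq_nine_iff (arr : List (List String)) (w b x : Nat) :
    List.count (((b : Int), (x : Int))) (pvStars arr w) = 9 ↔ pvQB arr w (b, x) = true := by
  rw [pv_count_stars]
  have hlen : (pvW arr b).length ≤ 3 := List.length_take_le _ _
  have hf : ∀ row ∈ pvW arr b, pvCnt3 w x row ≤ 3 := by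
    intro row _
    exact le_trans List.count_le_length (List.length_take_le _ _)
  rw [pv_sum3_eq_nine _ _ hlen hf]
  unfold pvQB
  rw [beq_iff_eq, pv_map_eq_three]
  constructor
  · rintro ⟨h1, h2⟩
    refine ⟨h1, fun row hr => ?_⟩
    have := (pv_count3_eq (pvBlkB w x row) (List.length_take_le _ _)).mp (h2 row hr)
    simpa [pvS3] using this
  · rintro ⟨h1, h2⟩
    refine ⟨h1, fun row hr => ?_⟩
    exact (pv_count3_eq (pvBlkB w x row) (List.length_take_le _ _)).mpr (by simpa [pvS3] using h2 row hr)

-- every key occurring in stars is a pair of nonnegative ints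
theorem pv_stars_key_nonneg (arr : List (List String)) (w : Nat) (k : Int × Int)
    (hk : k ∈ pvStars arr w) : ∃ b x : Nat, k = ((b : Int), (x : Int)) := by
  unfold pvStars at hk
  rw [List.mem_flatMap] at hk
  obtain ⟨rrow, hrr, hk⟩ := hk
  unfold pvRowStars at hk
  rw [List.mem_map] at hk
  obtain ⟨cv, hcv, hk⟩ := hk
  rw [List.mem_filter] at hcv
  have hr0 : 0 ≤ rrow.1 := by
    have hm : rrow.1 ∈ PySem.List.pyRange 0 (0 + (arr.length : Int)) := by
      rw [← PySem.List.map_fst_enumerate arr 0]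
      exact List.mem_map_of_mem hrr
    exact (PySem.List.mem_pyRange_one.mp hm).1
  have hc0 : 0 ≤ cv.1 := by
    have hm : cv.1 ∈ PySem.List.pyRange 0
        (0 + ((PySem.List.slice rrow.2 none (some ((w : Nat) : Int))).length : Int)) := by
      rw [← PySem.List.map_fst_enumerate _ 0]
      exact List.mem_map_of_mem hcv.1
    exact (PySem.List.mem_pyRange_one.mp hm).1
  refine ⟨rrow.1.toNat / 3, cv.1.toNat / 3, ?_⟩
  have h1 : rrow.1 = ((rrow.1.toNat : Nat) : Int) := by omega
  have h2 : cv.1 = ((cv.1.toNat : Nat) : Int) := by omega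
  have e1 : PySem.Int.floordiv rrow.1 3 = ((rrow.1.toNat / 3 : Nat) : Int) := by
    conv_lhs => rw [h1]
    exact_mod_cast PySem.Int.floordiv_natCast rrow.1.toNat 3
  have e2 : PySem.Int.floordiv cv.1 3 = ((cv.1.toNat / 3 : Nat) : Int) := by
    conv_lhs => rw [h2]
    exact_mod_cast PySem.Int.floordiv_natCast cv.1.toNat 3
  rw [← hk, e1, e2]

-- a full block lies inside A's loop bounds
theorem pv_qB_bounds (arr : List (List String)) (w : Nat) (b x : Nat)
    (h : pvQB arr w (b, x) = true) : b < arr.length / 3 ∧ x < w / 3 := by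
  unfold pvQB at h
  rw [beq_iff_eq, pv_map_eq_three] at h
  obtain ⟨hlen, hall⟩ := h
  have hb : b < arr.length / 3 := by
    unfold pvW at hlen
    rw [List.length_take, List.length_drop] at hlen
    omega
  refine ⟨hb, ?_⟩
  have hny : pvW arr b ≠ [] := by
    intro hc; rw [hc] at hlen; simp at hlen
  obtain ⟨row, hrow⟩ := List.exists_mem_of_ne_nil _ hny
  have := hall row hrow
  have hl3 : (pvBlkB w x row).length = 3 := by rw [this]; rfl
  unfold pvBlkB at hl3
  rw [List.length_take, List.length_drop, List.length_take] at hl3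
  omega

-- A's range(0, n-2, 3), reindexed by block number
theorem pv_rangeA (n : Nat) :
    PySem.List.pyRange 0 ((n : Int) - 2) 3 = (List.range (n / 3)).map (fun k => ((3 * k : Nat) : Int)) := by
  rw [PySem.List.pyRange_of_pos _ _ (by norm_num)]
  have hcnt : (if (0 : Int) < (n : Int) - 2 then (((n : Int) - 2 - 0 + 3 - 1) / 3).toNat else 0) = n / 3 := by
    split_ifs with h <;> omega
  rw [hcnt]
  apply List.map_congr_left
  intro k _
  push_cast
  ring

theorem pv_cast_sum (l : List Nat) : ((l.sum : Nat) : Int) = (List.map (fun n : Nat => (n : Int)) l).sum := by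
  induction l with
  | nil => simp
  | cons a t ih => simp [ih]

theorem pv_blkB_eq (w x : Nat) (row : List String) (h : 3*x + 3 ≤ w) :
    pvBlkB w x row = pvBlkA x row := by
  unfold pvBlkB pvBlkA
  rw [List.drop_take, List.take_take, min_eq_left (by omega)]

theorem pv_countP_product (P : Nat × Nat → Bool) (m k : Nat) :
    ((List.countP P ((List.range m) ×ˢ (List.range k)) : Nat) : Int)
      = ((List.range m).map (fun b => ((List.countP (fun x => P (b, x)) (List.range k) : Nat) : Int))).sum := by
  have hpr : (List.range m) ×ˢ (List.range k)
      = (List.range m).flatMap (fun a => (List.range k).map (Prod.mk a)) := rfl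
  rw [hpr, List.countP_flatMap, pv_cast_sum, List.map_map]
  congr 1
  apply List.map_congr_left
  intro b _
  simp only [Function.comp]
  rw [List.countP_map]
  rfl

-- A as a count over block coordinates
theorem pv_A_eq (arr : List (List String)) :
    count_filled_cells arr =
      (((List.range (arr.length / 3)) ×ˢ (List.range ((PySem.List.pyGetD arr 0 []).length / 3))).countP
        (pvQB arr (PySem.List.pyGetD arr 0 []).length) : Int) := by
  unfold count_filled_cells
  rw [pv_countP_product]
  simp only [pv_rangeA, List.foldl_map]
  simp only [PySem.List.foldl_count_if]
  rw [PySem.List.foldl_add (List.range (arr.length / 3))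
    (fun b => ((List.countP
      (fun x => grid_is_filled ((PySem.List.slice arr (some ((3*b : Nat) : Int)) (some (((3*b : Nat) : Int) + 3))).map
        (fun row => PySem.List.slice row (some ((3*x : Nat) : Int)) (some (((3*x : Nat) : Int) + 3)))))
      (List.range ((PySem.List.pyGetD arr 0 []).length / 3)) : Nat) : Int)) 0]
  rw [zero_add]
  congr 1
  apply List.map_congr_left
  intro b _
  congr 1
  apply List.countP_congr
  intro x hx
  rw [List.mem_range] at hx
  have hx3 : 3*x + 3 ≤ (PySem.List.pyGetD arr 0 []).length := by omega
  have hy : ((3*b : Nat) : Int) + 3 = ((3*b + 3 : Nat) : Int) := by push_cast; ring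
  have hxc : ((3*x : Nat) : Int) + 3 = ((3*x + 3 : Nat) : Int) := by push_cast; ring
  rw [hy, PySem.List.slice_natCast, show 3*b + 3 - 3*b = 3 from by omega]
  have hrows : List.take 3 (List.drop (3*b) arr) = pvW arr b := rfl
  rw [hrows]
  have hmap : (pvW arr b).map
      (fun row => PySem.List.slice row (some ((3*x : Nat) : Int)) (some (((3*x : Nat) : Int) + 3)))
      = (pvW arr b).map (pvBlkB (PySem.List.pyGetD arr 0 []).length x) := by
    apply List.map_congr_left
    intro row _
    rw [hxc, PySem.List.slice_natCast, show 3*x + 3 - 3*x = 3 from by omega]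
    rw [pv_blkB_eq _ _ _ hx3]
    rfl
  rw [hmap]
  unfold grid_is_filled pvQB
  rfl

-- B as a count over the distinct star keys
theorem pv_B_eq (arr : List (List String)) (h : ¬ arr = []) :
    count_filled_cells_alt arr =
      ((PySem.Set.ofList (pvStars arr (PySem.List.pyGetD arr 0 []).length)).countP
        (fun k => (List.count k (pvStars arr (PySem.List.pyGetD arr 0 []).length) : Int) == 9) : Int) := by
  unfold count_filled_cells_alt
  rw [if_neg h]
  simp only [PySem.Dict.foldl_insert_getD_add_one_eq_counter]
  rw [PySem.List.foldl_count_if]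
  rw [zero_add]
  simp only [PySem.Dict.values, PySem.Dict.items_counter]
  rw [List.countP_map, List.countP_map]
  rfl

-- ===== VERDICT (by name: the statement is the Claim_ definition above) =====
theorem count_filled_cells_spec : Claim_equal_count_filled_cells := by
  intro arr _
  unfold Spec_count_filled_cells
  by_cases h : arr = []
  · subst h; rfl
  · rw [pv_A_eq, pv_B_eq arr h]
    congr 1
    rw [List.countP_eq_length_filter, List.countP_eq_length_filter]
    set w := (PySem.List.pyGetD arr 0 []).length with hw
    set st := pvStars arr w with hst
    set la := (((List.range (arr.length / 3)) ×ˢ (List.range (w / 3))).filter (pvQB arr w)) with hla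
    set lb := ((PySem.Set.ofList st).filter (fun k => (List.count k st : Int) == 9)) with hlb
    have hinj : Function.Injective (fun p : Nat × Nat => (((p.1 : Nat) : Int), ((p.2 : Nat) : Int))) := by
      intro p q hpq
      simp only [Prod.mk.injEq] at hpq
      exact Prod.ext (by exact_mod_cast hpq.1) (by exact_mod_cast hpq.2)
    have hnd1 : (la.map (fun p : Nat × Nat => ((p.1 : Int), (p.2 : Int)))).Nodup := by
      apply List.Nodup.map hinj
      exact List.Nodup.filter _ (List.Nodup.product (List.nodup_range) (List.nodup_range))
    have hnd2 : lb.Nodup := List.Nodup.filter _ (PySem.Set.nodup_ofList st)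
    have hmem : ∀ k : Int × Int,
        k ∈ la.map (fun p : Nat × Nat => ((p.1 : Int), (p.2 : Int))) ↔ k ∈ lb := by
      intro k
      constructor
      · intro hk
        rw [List.mem_map] at hk
        obtain ⟨p, hp, hpk⟩ := hk
        rw [hla, List.mem_filter] at hp
        have hq : pvQB arr w (p.1, p.2) = true := by simpa using hp.2
        have hcnt : List.count (((p.1 : Int), (p.2 : Int))) st = 9 :=
          (pv_count_eq_nine_iff arr w p.1 p.2).mpr hq
        rw [hlb, List.mem_filter]
        subst hpk
        constructor
        · rw [PySem.Set.mem_ofList]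
          exact List.count_pos_iff.mp (by rw [hcnt]; norm_num)
        · rw [hcnt]; rfl
      · intro hk
        rw [hlb, List.mem_filter] at hk
        obtain ⟨hks, hkq⟩ := hk
        rw [PySem.Set.mem_ofList] at hks
        obtain ⟨b, x, hbx⟩ := pv_stars_key_nonneg arr w k hks
        have hcnt : List.count k st = 9 := by
          have h9 : ((List.count k st : Nat) : Int) = 9 := beq_iff_eq.mp hkq
          exact_mod_cast h9
        subst hbx
        have hq : pvQB arr w (b, x) = true := (pv_count_eq_nine_iff arr w b x).mp hcnt
        have hbd := pv_qB_bounds arr w b x hq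
        rw [List.mem_map]
        refine ⟨(b, x), ?_, rfl⟩
        rw [hla, List.mem_filter, List.mem_product]
        exact ⟨⟨List.mem_range.mpr hbd.1, List.mem_range.mpr hbd.2⟩, hq⟩
    have hperm := (List.perm_ext_iff_of_nodup hnd1 hnd2).mpr hmem
    calc la.length = (la.map (fun p : Nat × Nat => ((p.1 : Int), (p.2 : Int)))).length := (List.length_map _).symm
      _ = lb.length := hperm.length_eq
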